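-- pv_equiv track=rewrite | github.com/nguyenhuyenag/algorithms | py-algorithm/arrays/count_common_words_with_one_occurence.py | countWords_OK
-- ===== SOURCE A (Python) =====
-- from typing import List
-- from collections import Counter
--
-- def countWords_OK(words1: List[str], words2: List[str]) -> int:
--     counter1, counter2 = Counter(words1), Counter(words2)
--     commons = set(words1) & set(words2)
--     count = 0
--     for word in commons:
--         if counter1.get(word) == 1 and counter2.get(word) == 1:
--             count += 1
--
--     return count
-- ===== SOURCE B (Python) =====
-- from typing import List
--
-- def _once(ws):
--     # ws is sorted; keep values whose run has length exactly 1
--     out = []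
--     k, n = 0, len(ws)
--     while k < n:
--         r = k
--         while r < n and ws[r] == ws[k]:
--             r += 1
--         if r - k == 1:
--             out.append(ws[k])
--         k = r
--     return out
--
-- def countWords_OK(words1: List[str], words2: List[str]) -> int:
--     # Sort-and-merge: no hashing. Sort each list, keep words whose run length
--     # is exactly 1, then count common words by a two-pointer merge of the two
--     # strictly increasing lists.
--     u1 = _once(sorted(words1))
--     u2 = _once(sorted(words2))
--     i = j = cnt = 0
--     while i < len(u1) and j < len(u2):
--         if u1[i] < u2[j]:
--             i += 1
--         elif u2[j] < u1[i]:
--             j += 1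
--         else:
--             cnt += 1
--             i += 1
--             j += 1
--     return cnt
-- ===== Notes on version B (the rewrite author's own statement) =====
-- stated objective: alternative
-- what changed: Replaces A's hash-based Counters and set intersection by a comparison-based sort-and-merge: sort each list, keep words whose run length is exactly 1, then count common words with a two-pointer merge of the two strictly increasing lists.
import Mathlib
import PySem

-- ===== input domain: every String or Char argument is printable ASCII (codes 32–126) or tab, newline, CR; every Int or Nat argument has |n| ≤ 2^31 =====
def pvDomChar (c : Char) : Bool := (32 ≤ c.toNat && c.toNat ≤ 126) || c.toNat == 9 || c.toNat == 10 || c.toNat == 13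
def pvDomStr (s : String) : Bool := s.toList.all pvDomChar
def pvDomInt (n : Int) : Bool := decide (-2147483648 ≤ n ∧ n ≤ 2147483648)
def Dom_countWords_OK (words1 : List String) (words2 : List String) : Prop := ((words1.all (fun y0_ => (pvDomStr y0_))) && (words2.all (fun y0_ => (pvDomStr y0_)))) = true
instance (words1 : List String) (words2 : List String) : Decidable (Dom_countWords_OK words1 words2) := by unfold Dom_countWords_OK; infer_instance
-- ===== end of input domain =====

-- B replaces A's Counters + set intersection by sort-and-merge: sort each list, keep words
-- whose run length is exactly 1, then count common words with a two-pointer merge (alternative; no hashing).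


-- ===== PORT A =====
-- for-loop over the set 'commons' ported as a foldl; the result (a count) is iteration-order independent
def countWords_OK (words1 : List String) (words2 : List String) : Int :=
  let counter1 := PySem.Dict.counter words1
  let counter2 := PySem.Dict.counter words2
  let commons := PySem.Set.inter (PySem.Set.ofList words1) (PySem.Set.ofList words2)
  commons.foldl (fun count word =>
    if counter1.get? word == some (1 : Int) && counter2.get? word == some (1 : Int)
    then count + 1 else count) 0

-- ===== PORT B =====
-- _once's inner 'while ws[r] == ws[k]' run scan is the takeWhile/dropWhile split of the run at k;
-- the outer 'while k < n' becomes recursion on the remaining suffix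
def pvOnce (ws : List String) : List String :=
  match ws with
  | [] => []
  | x :: xs =>
    if (xs.takeWhile (fun y => y == x)).isEmpty
    then x :: pvOnce (xs.dropWhile (fun y => y == x))
    else pvOnce (xs.dropWhile (fun y => y == x))
termination_by ws.length
decreasing_by
  all_goals
    simp only [List.length_cons]
    exact Nat.lt_succ_of_le (List.length_dropWhile_le _ _)

-- the two-pointer merge: each branch advances the pointer(s) the Python advances
def pvMergeCount (u : List String) (v : List String) : Int :=
  match u, v with
  | [], _ => 0
  | _ :: _, [] => 0
  | a :: as, b :: bs =>
    if a < b then pvMergeCount as (b :: bs)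
    else if b < a then pvMergeCount (a :: as) bs
    else 1 + pvMergeCount as bs

def countWords_OK_alt (words1 : List String) (words2 : List String) : Int :=
  let u1 := pvOnce (PySem.List.sorted words1 (fun x => x) false)
  let u2 := pvOnce (PySem.List.sorted words2 (fun x => x) false)
  pvMergeCount u1 u2

-- ===== PRECONDITION & SPEC =====
def Spec_countWords_OK (words1 : List String) (words2 : List String) (out : Int) : Prop := out = countWords_OK_alt words1 words2
instance (words1 : List String) (words2 : List String) (out : Int) : Decidable (Spec_countWords_OK words1 words2 out) := by unfold Spec_countWords_OK; infer_instance

-- ===== CLAIM (what is proved, stated in full; the proofs are below) =====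
def Claim_equal_countWords_OK : Prop := ∀ (words1 : List String) (words2 : List String), Dom_countWords_OK words1 words2 → Spec_countWords_OK words1 words2 (countWords_OK words1 words2)

-- ===== LEMMAS AND PROOFS =====

-- pvOnce only keeps elements of its input
theorem pvOnce_subset (l : List String) : ∀ x, x ∈ pvOnce l → x ∈ l := by
  induction hn : l.length using Nat.strong_induction_on generalizing l with
  | _ n ih =>
    cases l with
    | nil => simp [pvOnce]
    | cons x xs =>
      intro y hy
      rw [pvOnce] at hy
      have hlen : (xs.dropWhile (fun y => y == x)).length < n := by
        simp only [List.length_cons] at hn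
        have := List.length_dropWhile_le (fun y => y == x) xs
        omega
      have hrec := ih _ hlen (xs.dropWhile (fun y => y == x)) rfl
      split_ifs at hy with h
      · rcases List.mem_cons.1 hy with h' | h'
        · simp [h']
        · exact List.mem_cons_of_mem _ ((List.dropWhile_sublist _).mem (hrec y h'))
      · exact List.mem_cons_of_mem _ ((List.dropWhile_sublist _).mem (hrec y hy))

-- the head element is strictly below everything the dropWhile (== head) keeps, in a sorted list
theorem pv_lt_of_mem_rest (x : String) (xs : List String)
    (hs : (x :: xs).Pairwise (· ≤ ·)) :
    ∀ y ∈ xs.dropWhile (fun y => y == x), x < y := by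
  cases hr : xs.dropWhile (fun y => y == x) with
  | nil => intro y hy; simp at hy
  | cons b t =>
    intro y hy
    have hb : (b == x) = false := by
      have := List.head_dropWhile_not (fun y => y == x) (l := xs) (by simp [hr])
      simpa [hr] using this
    have hbx : b ≠ x := by simpa using hb
    have hxb : x ≤ b :=
      (List.pairwise_cons.1 hs).1 b ((List.dropWhile_sublist _).mem (by rw [hr]; exact List.mem_cons_self))
    have hxblt : x < b := lt_of_le_of_ne hxb (Ne.symm hbx)
    have hrp : (b :: t).Pairwise (· ≤ ·) :=
      hr ▸ ((List.pairwise_cons.1 hs).2.sublist (List.dropWhile_sublist _))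
    rcases List.mem_cons.1 hy with h' | h'
    · exact h' ▸ hxblt
    · exact lt_of_lt_of_le hxblt (List.rel_of_pairwise_cons hrp h')

-- characterisation of pvOnce on a sorted list: membership = count 1, and the output is strictly increasing
theorem pvOnce_spec (l : List String) (hs : l.Pairwise (· ≤ ·)) :
    (∀ x, x ∈ pvOnce l ↔ l.count x = 1) ∧ (pvOnce l).Pairwise (· < ·) := by
  induction hn : l.length using Nat.strong_induction_on generalizing l with
  | _ n ih =>
    cases l with
    | nil => simp [pvOnce]
    | cons x xs =>
      subst hn
      set run := xs.takeWhile (fun y => y == x) with hrun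
      set rest := xs.dropWhile (fun y => y == x) with hrest
      have hxs : xs.Pairwise (· ≤ ·) := (List.pairwise_cons.1 hs).2
      have hrest_sorted : rest.Pairwise (· ≤ ·) := hxs.sublist (List.dropWhile_sublist _)
      have hlt : ∀ y ∈ rest, x < y := pv_lt_of_mem_rest x xs hs
      have hlen : rest.length < (x :: xs).length :=
        Nat.lt_succ_of_le (List.length_dropWhile_le _ _)
      obtain ⟨ihmem, ihpw⟩ := ih rest.length hlen rest hrest_sorted rfl
      have hsplit : run ++ rest = xs := List.takeWhile_append_dropWhile
      have hrun_all : ∀ y ∈ run, y = x := by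
        intro y hy; simpa using List.mem_takeWhile_imp hy
      have hcx : (x :: xs).count x = 1 + run.length := by
        rw [← hsplit, List.count_cons_self, List.count_append]
        have h1 : run.count x = run.length := by
          rw [List.count_eq_length]; intro y hy; rw [hrun_all y hy]
        have h2 : rest.count x = 0 := by
          rw [List.count_eq_zero]; intro hx; exact absurd (hlt x hx) (lt_irrefl x)
        omega
      have hcy : ∀ y, y ≠ x → (x :: xs).count y = rest.count y := by
        intro y hyx
        have h0 : run.count y = 0 := by
          rw [List.count_eq_zero]; intro hy; exact hyx (hrun_all y hy)
        rw [← hsplit]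
        simp [List.count_append, h0, (Ne.symm hyx : x ≠ y)]
      have hxnot : x ∉ pvOnce rest := fun h => absurd (hlt x (pvOnce_subset rest x h)) (lt_irrefl x)
      have honce : pvOnce (x :: xs) = if run.isEmpty then x :: pvOnce rest else pvOnce rest := by
        rw [pvOnce]
      constructor
      · intro y
        rw [honce]
        by_cases hyx : y = x
        · subst hyx
          split_ifs with he
          · have hc1 : List.count y (y :: xs) = 1 := by
              rw [hcx, List.isEmpty_iff.1 he]; simp
            simp [hc1, List.mem_cons]
          · have h1 : 0 < run.length :=
              List.length_pos_iff.2 (fun h => he (List.isEmpty_iff.2 h))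
            constructor
            · intro h; exact absurd h hxnot
            · intro h; rw [hcx] at h; omega
        · rw [hcy y hyx]
          split_ifs with he
          · simp only [List.mem_cons, hyx, false_or]; exact ihmem y
          · exact ihmem y
      · rw [honce]
        split_ifs with he
        · exact List.pairwise_cons.2 ⟨fun y hy => hlt y (pvOnce_subset rest y hy), ihpw⟩
        · exact ihpw

-- two-pointer merge on strictly increasing lists counts the common elements
theorem pvMergeCount_spec (u v : List String)
    (hu : u.Pairwise (· < ·)) (hv : v.Pairwise (· < ·)) :
    pvMergeCount u v = (u.countP (fun x => decide (x ∈ v)) : Int) := by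
  induction u, v using pvMergeCount.induct with
  | case1 v => simp [pvMergeCount]
  | case2 a as => simp [pvMergeCount]
  | case3 a as b bs hab ih =>
    -- a < b: a is below everything in b :: bs
    have ha : a ∉ b :: bs := by
      intro h
      rcases List.mem_cons.1 h with h' | h'
      · exact absurd (h' ▸ hab) (lt_irrefl _)
      · exact absurd (lt_trans hab (List.rel_of_pairwise_cons hv h')) (lt_irrefl _)
    rw [pvMergeCount, if_pos hab, ih (List.pairwise_cons.1 hu).2 hv]
    have ha' : (decide (a ∈ b :: bs)) = false := by simpa using ha
    rw [List.countP_cons, ha']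
    simp
  | case4 a as b bs hab hba ih =>
    -- b < a: b is below everything in a :: as, so membership in b :: bs = membership in bs there
    have hcong : List.countP (fun x => decide (x ∈ b :: bs)) (a :: as)
        = List.countP (fun x => decide (x ∈ bs)) (a :: as) := by
      apply List.countP_congr
      intro y hy
      have hby : b < y := by
        rcases List.mem_cons.1 hy with h' | h'
        · exact h' ▸ hba
        · exact lt_trans hba (List.rel_of_pairwise_cons hu h')
      have hiff : y ∈ b :: bs ↔ y ∈ bs := by
        simp only [List.mem_cons]
        constructor
        · rintro (h | h)
          · exact absurd (h ▸ hby) (lt_irrefl _)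
          · exact h
        · exact Or.inr
      simp [hiff]
    rw [pvMergeCount, if_neg hab, if_pos hba, ih hu (List.pairwise_cons.1 hv).2, hcong]
  | case5 a as b bs hab hba ih =>
    -- a = b: count it and advance both
    have hEq : a = b := le_antisymm (not_lt.1 hba) (not_lt.1 hab)
    rw [pvMergeCount, if_neg hab, if_neg hba,
      ih (List.pairwise_cons.1 hu).2 (List.pairwise_cons.1 hv).2]
    have hmem : as.countP (fun x => decide (x ∈ b :: bs)) = as.countP (fun x => decide (x ∈ bs)) := by
      rw [List.countP_congr]
      intro y hy
      have hay : a < y := List.rel_of_pairwise_cons hu hy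
      simp only [decide_eq_true_eq, List.mem_cons]
      constructor
      · rintro (h | h)
        · exact absurd (h ▸ hEq ▸ hay) (lt_irrefl _)
        · exact h
      · exact Or.inr
    have hab' : (decide (a ∈ b :: bs)) = true := by simp [hEq]
    have hstep : List.countP (fun x => decide (x ∈ b :: bs)) (a :: as)
        = List.countP (fun x => decide (x ∈ bs)) as + 1 := by
      rw [List.countP_cons, hmem, hab']
      simp
    rw [hstep]
    push_cast
    ring

-- get? = some 1 is getD = 1 (a none lookup gives default 0 ≠ 1)
theorem pv_get?_eq_some_one_iff {κ : Type} [BEq κ] (d : PySem.Dict κ Int) (k : κ) :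
    d.get? k = some 1 ↔ d.getD k 0 = 1 := by
  rw [PySem.Dict.getD_eq_get?_getD]
  cases h : d.get? k <;> simp

-- countP over two nodup lists agrees when the filtered memberships agree
theorem pv_countP_eq_of_nodup {α : Type} (l1 l2 : List α) (p q : α → Bool)
    (h1 : l1.Nodup) (h2 : l2.Nodup)
    (h : ∀ x, (x ∈ l1 ∧ p x = true) ↔ (x ∈ l2 ∧ q x = true)) :
    l1.countP p = l2.countP q := by
  rw [List.countP_eq_length_filter, List.countP_eq_length_filter]
  refine List.Perm.length_eq ?_
  refine (List.perm_ext_iff_of_nodup (h1.filter p) (h2.filter q)).2 ?_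
  intro a
  simp only [List.mem_filter]
  exact h a

-- ===== VERDICT (by name: the statement is the Claim_ definition above) =====
theorem countWords_OK_spec : Claim_equal_countWords_OK := by
  intro words1 words2 _
  unfold Spec_countWords_OK countWords_OK countWords_OK_alt

  -- A side: the foldl is a countP over the (nodup) intersection
  rw [PySem.List.foldl_count_if]
  -- B side: characterise the sorted/once/merge pipeline
  have hs1 : (PySem.List.sorted words1 (fun x => x) false).Pairwise (· ≤ ·) :=
    PySem.List.sorted_pairwise _ _
  have hs2 : (PySem.List.sorted words2 (fun x => x) false).Pairwise (· ≤ ·) :=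
    PySem.List.sorted_pairwise _ _
  obtain ⟨hm1, hp1⟩ := pvOnce_spec _ hs1
  obtain ⟨hm2, hp2⟩ := pvOnce_spec _ hs2
  have hc1 : ∀ x, (PySem.List.sorted words1 (fun x => x) false).count x = words1.count x :=
    fun x => (PySem.List.sorted_perm words1 (fun x => x) false).count_eq x
  have hc2 : ∀ x, (PySem.List.sorted words2 (fun x => x) false).count x = words2.count x :=
    fun x => (PySem.List.sorted_perm words2 (fun x => x) false).count_eq x
  rw [pvMergeCount_spec _ _ hp1 hp2]
  have hnd1 : ((PySem.Set.ofList words1).inter (PySem.Set.ofList words2)).Nodup :=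
    PySem.Set.nodup_inter _ _ (PySem.Set.nodup_ofList _)
  have hndu : (pvOnce (PySem.List.sorted words1 (fun x => x) false)).Nodup :=
    hp1.imp ne_of_lt
  have key := pv_countP_eq_of_nodup
    ((PySem.Set.ofList words1).inter (PySem.Set.ofList words2))
    (pvOnce (PySem.List.sorted words1 (fun x => x) false))
    (fun word => (PySem.Dict.counter words1).get? word == some (1 : Int) &&
                 (PySem.Dict.counter words2).get? word == some (1 : Int))
    (fun x => decide (x ∈ pvOnce (PySem.List.sorted words2 (fun x => x) false)))
    hnd1 hndu ?_
  · omega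
  · intro x
    simp only [Bool.and_eq_true, beq_iff_eq, decide_eq_true_eq,
      PySem.Set.mem_inter, PySem.Set.mem_ofList, pv_get?_eq_some_one_iff,
      PySem.Dict.getD_counter, hm1, hm2, hc1, hc2]
    constructor
    · rintro ⟨⟨_, _⟩, c1, c2⟩
      exact ⟨by omega, by omega⟩
    · rintro ⟨c1, c2⟩
      refine ⟨⟨?_, ?_⟩, by omega, by omega⟩
      · exact List.count_pos_iff.1 (by omega)
      · exact List.count_pos_iff.1 (by omega)
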